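-- pv_equiv track=rewrite | github.com/KotisKotlyandii/lessons1 | ege22/116.py | f
-- ===== SOURCE A (Python) =====
-- def f(x):
--     a,b=0,1
--     while x > 0:
--         if x % 2 > 0:
--             a += x %6
--         else:
--             b += x %6
--         x //= 6
--     return a,b
-- ===== SOURCE B (Python) =====
-- def f(x):
--     digits = []
--     while x > 0:
--         digits.append(x % 6)
--         x //= 6
--     a = sum(d for d in digits if d % 2 == 1)
--     b = 1 + sum(d for d in digits if d % 2 == 0)
--     return a, b
-- ===== Notes on version B (the rewrite author's own statement) =====
-- stated objective: alternative
-- what changed: B first materialises the base-6 digit list, then computes a and b in two separate filtered sums over that list (using that the running value's parity equals the current digit's parity because six is even), instead of A's single loop branching on the running value's parity with two accumulators.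
import Mathlib
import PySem

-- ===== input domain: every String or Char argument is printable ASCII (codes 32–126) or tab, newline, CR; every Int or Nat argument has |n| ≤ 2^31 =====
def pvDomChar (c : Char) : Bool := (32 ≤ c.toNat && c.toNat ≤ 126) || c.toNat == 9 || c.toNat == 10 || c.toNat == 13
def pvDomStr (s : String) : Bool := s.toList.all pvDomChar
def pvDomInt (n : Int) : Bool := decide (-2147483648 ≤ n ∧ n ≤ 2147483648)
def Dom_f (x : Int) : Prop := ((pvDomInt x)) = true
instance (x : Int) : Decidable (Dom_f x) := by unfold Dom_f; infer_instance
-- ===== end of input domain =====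

-- B restructures A's single accumulator loop into: build the base-6 digit list, then two filtered sums (alternative decomposition, same cost).

-- ===== PORT A =====
-- A's while loop over (x, a, b); branch on x % 2, accumulate x % 6 into a or b, x //= 6.
def fLoop (x a b : Int) : Int × Int :=
  if _h : x > 0 then
    if PySem.Int.mod x 2 > 0 then
      fLoop (PySem.Int.floordiv x 6) (a + PySem.Int.mod x 6) b
    else
      fLoop (PySem.Int.floordiv x 6) a (b + PySem.Int.mod x 6)
  else (a, b)
termination_by x.toNat
decreasing_by
  all_goals
    simp only [PySem.Int.floordiv_eq_ediv_of_pos (a := x) (by omega : (0:Int) < 6)]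
    omega

def f (x : Int) : Int × Int := fLoop x 0 1

-- ===== PORT B =====
-- the digit list built by B's first while loop
def digitsB (x : Int) : List Int :=
  if _h : x > 0 then PySem.Int.mod x 6 :: digitsB (PySem.Int.floordiv x 6) else []
termination_by x.toNat
decreasing_by
  simp only [PySem.Int.floordiv_eq_ediv_of_pos (a := x) (by omega : (0:Int) < 6)]
  omega

def f_alt (x : Int) : Int × Int :=
  let digits := digitsB x
  ((digits.filter (fun d => PySem.Int.mod d 2 == 1)).sum,
   1 + (digits.filter (fun d => PySem.Int.mod d 2 == 0)).sum)

-- ===== PRECONDITION & SPEC =====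
def Spec_f (x : Int) (out : Int × Int) : Prop := out = f_alt x
instance (x : Int) (out : Int × Int) : Decidable (Spec_f x out) := by unfold Spec_f; infer_instance

-- ===== CLAIM (what is proved, stated in full; the proofs are below) =====
def Claim_equal_f : Prop := ∀ (x : Int), Dom_f x → Spec_f x (f x)

-- ===== LEMMAS AND PROOFS =====

-- parity of x equals parity of its low base-6 digit (6 is even)
theorem mod2_eq_mod6_mod2 (x : Int) : PySem.Int.mod x 2 = PySem.Int.mod (PySem.Int.mod x 6) 2 := by
  simp only [PySem.Int.mod_eq_emod_of_pos (by omega : (0:Int) < 2),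
             PySem.Int.mod_eq_emod_of_pos (by omega : (0:Int) < 6)]
  omega

theorem fLoop_eq (x : Int) : ∀ a b : Int,
    fLoop x a b = (a + ((digitsB x).filter (fun d => PySem.Int.mod d 2 == 1)).sum,
                   b + ((digitsB x).filter (fun d => PySem.Int.mod d 2 == 0)).sum) := by
  induction x using fLoop.induct (a := 37) (b := 59) with
  | case1 x a0 b0 hx hodd ih =>
      intro a b
      rw [fLoop, digitsB]
      have hm := mod2_eq_mod6_mod2 x
      simp only [PySem.Int.mod_eq_emod_of_pos (by omega : (0:Int) < 2),
                 PySem.Int.mod_eq_emod_of_pos (by omega : (0:Int) < 6)] at hm hodd ⊢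
      have h1 : (x % 6) % 2 = 1 := by omega
      simp only [hx, dif_pos, if_pos hodd, ih]
      simp [h1]
      ring_nf
  | case2 x a0 b0 hx hodd ih =>
      intro a b
      rw [fLoop, digitsB]
      have hm := mod2_eq_mod6_mod2 x
      simp only [PySem.Int.mod_eq_emod_of_pos (by omega : (0:Int) < 2),
                 PySem.Int.mod_eq_emod_of_pos (by omega : (0:Int) < 6)] at hm hodd ⊢
      have h0 : (x % 6) % 2 = 0 := by omega
      simp only [hx, dif_pos, if_neg hodd, ih]
      simp [h0]
      ring_nf
  | case3 x a0 b0 hx =>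
      intro a b
      rw [fLoop, digitsB]
      simp [hx]

-- ===== VERDICT (by name: the statement is the Claim_ definition above) =====
theorem f_spec : Claim_equal_f := by
  intro x _
  unfold Spec_f f f_alt
  rw [fLoop_eq]
  simp
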